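-- pv_equiv track=rewrite | github.com/khm1102/BOJ | 프로그래머스/5/81305. 시험장 나누기/시험장 나누기.py | solution
-- ===== SOURCE A (Python) =====
-- def find_root(lnks, n):
--     parent = [-1] * n
--     for i in range(n):
--         lft, rgt = lnks[i]
--         if lft != -1:
--             parent[lft] = i
--         if rgt != -1:
--             parent[rgt] = i
--     return next(i for i, p in enumerate(parent) if p == -1)
--
-- def dfs(root, nums, lnks, max_grp_sum):
--     stack = [(root, 0)]
--     sums = {}
--     grp_cnt = [0]
--
--     while stack:
--         node, state = stack.pop()
--         if node == -1:
--             continue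
--
--         if state == 0:
--             stack.append((node, 1))
--             stack.append((lnks[node][0], 0))
--             stack.append((lnks[node][1], 0))
--         else:
--             lft_sum = sums.get(lnks[node][0], 0)
--             rgt_sum = sums.get(lnks[node][1], 0)
--             cur_sum = nums[node]
--
--             if cur_sum + lft_sum + rgt_sum <= max_grp_sum:
--                 sums[node] = cur_sum + lft_sum + rgt_sum
--             elif cur_sum + min(lft_sum, rgt_sum) <= max_grp_sum:
--                 grp_cnt[0] += 1
--                 sums[node] = cur_sum + min(lft_sum, rgt_sum)
--             else:
--                 grp_cnt[0] += 2
--                 sums[node] = cur_sum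
--
--     return sums[root], grp_cnt[0] + 1
--
-- def part(root, nums, lnks, max_grp_sum, k):
--     _, grp_cnt = dfs(root, nums, lnks, max_grp_sum)
--     return grp_cnt <= k
--
-- def solution(k, nums, lnks):
--     n = len(nums)
--     root = find_root(lnks, n)
--
--     l, r = max(nums), sum(nums)
--     ans = r
--
--     while l <= r:
--         mid = (l + r) // 2
--         if part(root, nums, lnks, mid, k):
--             ans = mid
--             r = mid - 1
--         else:
--             l = mid + 1
--
--     return ans
-- ===== SOURCE B (Python) =====
-- def solution(k, nums, lnks):
--     n = len(nums)
--
--     # root = the one index that never appears as a child (boolean marks instead of a parent array)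
--     has_parent = [False] * n
--     for lft, rgt in lnks[:n]:
--         if lft != -1:
--             has_parent[lft] = True
--         if rgt != -1:
--             has_parent[rgt] = True
--     root = has_parent.index(False)
--
--     # pure post-order recursion: returns (subtree group sum, groups already cut off),
--     # no sums dict and no explicit stack; right subtree first, like A's pop order
--     def go(node, limit):
--         if node == -1:
--             return 0, 0
--         rgt, rc = go(lnks[node][1], limit)
--         lft, lc = go(lnks[node][0], limit)
--         cur = nums[node]
--         if cur + lft + rgt <= limit:
--             return cur + lft + rgt, rc + lc
--         if cur + min(lft, rgt) <= limit:
--             return cur + min(lft, rgt), rc + lc + 1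
--         return cur, rc + lc + 2
--
--     lo, hi = max(nums), sum(nums)
--     ans = hi
--     while lo <= hi:
--         mid = (lo + hi) // 2
--         _, cut = go(root, mid)
--         if cut + 1 <= k:
--             ans = mid
--             hi = mid - 1
--         else:
--             lo = mid + 1
--     return ans
-- ===== Notes on version B (the rewrite author's own statement) =====
-- stated objective: simpler
-- what changed: A's explicit (node,state)-stack machine with its sums dict and shared grp_cnt cell is replaced by a pure post-order recursion returning (subtree sum, groups cut) pairs with no dict or stack at all, and find_root's parent array by boolean has-parent marks scanned with list.index; the three-way greedy rule and the binary search are kept.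
-- outside the precondition, e.g. on solution(2, [1, 1], [(1, 1), (-1, -1)]): A returns 2, B returns 2; on solution(2, [1, 2], [(-2, -1), (-1, -1)]): A returns 2, B returns 2
import Mathlib
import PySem

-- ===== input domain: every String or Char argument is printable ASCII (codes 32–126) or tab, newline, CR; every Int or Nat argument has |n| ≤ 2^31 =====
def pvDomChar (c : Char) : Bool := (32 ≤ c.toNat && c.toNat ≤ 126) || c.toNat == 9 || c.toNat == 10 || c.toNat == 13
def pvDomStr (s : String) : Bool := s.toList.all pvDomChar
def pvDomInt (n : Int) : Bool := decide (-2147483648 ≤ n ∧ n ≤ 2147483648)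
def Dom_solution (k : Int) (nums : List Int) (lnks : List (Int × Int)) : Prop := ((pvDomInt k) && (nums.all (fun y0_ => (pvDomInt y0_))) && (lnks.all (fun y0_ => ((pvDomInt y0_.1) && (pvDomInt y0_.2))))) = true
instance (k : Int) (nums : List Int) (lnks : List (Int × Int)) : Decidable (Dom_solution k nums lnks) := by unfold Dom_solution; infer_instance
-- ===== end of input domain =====

-- B replaces A's explicit (node,state)-stack DFS with its sums dict and shared counter cell by a pure
-- post-order recursion returning (subtree sum, groups cut) pairs, and the parent array of find_root by
-- boolean has-parent marks scanned with .index (objective: simpler, no speed claim).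

-- ===== PORT A =====
-- A-side index helpers: lnks[node] / nums[node] with Python's negative-index rule;
-- the .getD default is reached only where Python raises IndexError (outside Pre_solution)
def pyLnk (lnks : List (Int × Int)) (i : Int) : Int × Int := (PySem.List.pyGet? lnks i).getD (-1, -1)

def pyNum (nums : List Int) (i : Int) : Int := (PySem.List.pyGet? nums i).getD 0

-- find_root: parent = [-1]*n; for i in range(n) the two writes; then
-- next(i for i, p in enumerate(parent) if p == -1).
-- pySetD no-ops and the 'none ⇒ 0' arm fire only where Python raises (IndexError / StopIteration), outside Pre_solution.
def findRoot (lnks : List (Int × Int)) (n : Nat) : Int :=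
  let parent := (List.range n).foldl (fun par (i : Nat) =>
      let pr := pyLnk lnks (i : Int)
      let par := if pr.1 ≠ -1 then PySem.List.pySetD par pr.1 (i : Int) else par
      if pr.2 ≠ -1 then PySem.List.pySetD par pr.2 (i : Int) else par)
    (List.replicate n (-1 : Int))
  match parent.findIdx? (· == (-1 : Int)) with
  | some i => (i : Int)
  | none => 0

-- A's dfs while-loop over the explicit stack, one fuel tick per pop (a while loop needs fuel in Lean;
-- on inputs satisfying Pre_solution the stack sees at most 3n+1 pops, so the fuel 4n+4 below never runs out
-- and the fuel-exhausted arm, which returns the current state exactly like an emptied stack, is never taken)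
def runA (nums : List Int) (lnks : List (Int × Int)) (m : Int) :
    Nat → List (Int × Int) → PySem.Dict Int Int → Int → PySem.Dict Int Int × Int
  | _, [], sums, cnt => (sums, cnt)
  | 0, _ :: _, sums, cnt => (sums, cnt)
  | f + 1, (node, st) :: rest, sums, cnt =>
    if node = -1 then runA nums lnks m f rest sums cnt
    else if st = 0 then
      runA nums lnks m f
        (((pyLnk lnks node).2, 0) :: ((pyLnk lnks node).1, 0) :: (node, 1) :: rest) sums cnt
    else
      let lft := sums.getD (pyLnk lnks node).1 0
      let rgt := sums.getD (pyLnk lnks node).2 0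
      let cur := pyNum nums node
      if cur + lft + rgt ≤ m then
        runA nums lnks m f rest (sums.insert node (cur + lft + rgt)) cnt
      else if cur + min lft rgt ≤ m then
        runA nums lnks m f rest (sums.insert node (cur + min lft rgt)) (cnt + 1)
      else
        runA nums lnks m f rest (sums.insert node cur) (cnt + 2)

-- dfs: returns (sums[root], grp_cnt + 1); sums[root] would be a KeyError only outside Pre_solution
def dfsA (nums : List Int) (lnks : List (Int × Int)) (m root : Int) : Int × Int :=
  let r := runA nums lnks m (4 * nums.length + 4) [(root, 0)] PySem.Dict.empty 0
  (r.1.getD root 0, r.2 + 1)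

def partA (nums : List Int) (lnks : List (Int × Int)) (m root k : Int) : Bool :=
  (dfsA nums lnks m root).2 ≤ k

-- the while l <= r binary search (a genuine recursion: the interval shrinks, no fuel needed)
def bsA (nums : List Int) (lnks : List (Int × Int)) (root k : Int) (l r ans : Int) : Int :=
  if h : l ≤ r then
    let mid := PySem.Int.floordiv (l + r) 2
    if partA nums lnks mid root k then bsA nums lnks root k l (mid - 1) mid
    else bsA nums lnks root k (mid + 1) r ans
  else ans
termination_by (r + 1 - l).toNat
decreasing_by
  · have := PySem.Int.floordiv_two_mid_bounds h; omega
  · have := PySem.Int.floordiv_two_mid_bounds h; omega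

def solution (k : Int) (nums : List Int) (lnks : List (Int × Int)) : Int :=
  let n := nums.length
  let root := findRoot lnks n
  let l := (PySem.List.max? nums (fun x => x)).getD 0   -- max(nums); .getD only where Python raises on []
  let r := nums.foldl (· + ·) 0                          -- sum(nums)
  bsA nums lnks root k l r r

-- ===== PORT B =====
-- B-side index helpers (same Python indexing rule, B's own names)
def kidsB (lnks : List (Int × Int)) (i : Int) : Int × Int := (PySem.List.pyGet? lnks i).getD (-1, -1)

def valB (nums : List Int) (i : Int) : Int := (PySem.List.pyGet? nums i).getD 0

-- has_parent = [False]*n marked over lnks[:n]; root = has_parent.index(False)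
-- (the 'none ⇒ 0' arm is Python's ValueError, outside Pre_solution; lnks.take is exact for the slice [:n], n ≥ 0)
def findRootB (lnks : List (Int × Int)) (n : Nat) : Int :=
  let hp := (PySem.List.slice lnks none (some (n : Int))).foldl
    (fun hp p =>
      let hp := if p.1 ≠ -1 then PySem.List.pySetD hp p.1 true else hp
      if p.2 ≠ -1 then PySem.List.pySetD hp p.2 true else hp)
    (List.replicate n false)
  match PySem.List.index? hp false with
  | some i => (i : Int)
  | none => 0

-- Source B's pure recursive go(node, limit) returning (subtree group sum, groups cut off).
-- The Nat argument is fuel making the recursion structural for Lean (Source B's recursion has none),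
-- threaded through the calls; the Bool flag records exhaustion, which inputs in Pre_solution never reach.
def goPure (nums : List Int) (lnks : List (Int × Int)) (limit : Int) :
    Nat → Int → Nat × Int × Int × Bool
  | 0, _ => (0, 0, 0, false)
  | f + 1, node =>
    if node = -1 then (f, 0, 0, true)
    else
      let r := goPure nums lnks limit f (kidsB lnks node).2          -- go(lnks[node][1])
      if r.2.2.2 then
        let l := goPure nums lnks limit (min r.1 f) (kidsB lnks node).1   -- go(lnks[node][0])
        if l.2.2.2 then
          match l.1 with
          | 0 => (0, 0, r.2.2.1 + l.2.2.1, false)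
          | g + 1 =>
            let cur := valB nums node
            if cur + l.2.1 + r.2.1 ≤ limit then
              (g, cur + l.2.1 + r.2.1, r.2.2.1 + l.2.2.1, true)
            else if cur + min l.2.1 r.2.1 ≤ limit then
              (g, cur + min l.2.1 r.2.1, r.2.2.1 + l.2.2.1 + 1, true)
            else (g, cur, r.2.2.1 + l.2.2.1 + 2, true)
        else (0, 0, r.2.2.1 + l.2.2.1, false)
      else (0, 0, r.2.2.1, false)

-- Source B's while lo <= hi loop with the go call and 'cut + 1 <= k' inline
def loopB (nums : List Int) (lnks : List (Int × Int)) (root k : Int) (lo hi ans : Int) : Int :=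
  if h : lo ≤ hi then
    let mid := PySem.Int.floordiv (lo + hi) 2
    let t := goPure nums lnks mid (4 * nums.length + 4) root
    if t.2.2.1 + 1 ≤ k then loopB nums lnks root k lo (mid - 1) mid
    else loopB nums lnks root k (mid + 1) hi ans
  else ans
termination_by (hi + 1 - lo).toNat
decreasing_by
  · have := PySem.Int.floordiv_two_mid_bounds h; omega
  · have := PySem.Int.floordiv_two_mid_bounds h; omega

def solution_alt (k : Int) (nums : List Int) (lnks : List (Int × Int)) : Int :=
  let root := findRootB lnks nums.length
  loopB nums lnks root k ((PySem.List.max? nums (fun x => x)).getD 0) nums.sum nums.sum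

-- ===== PRECONDITION & SPEC =====
-- Pre_solution = inputs on which the Python A returns: nums nonempty (max(nums) raises on []), the first n link
-- pairs index within [-n, n) (anything else makes find_root's parent[child] = i an IndexError), and some node of
-- range(n) is parentless (else find_root's next() raises StopIteration; negative children wrap as in Python).
-- Beyond that, either max(nums) > sum(nums) — the while loop of the binary search never runs, so neither version
-- traverses the links — or the links form a plain forest: no negative (wrapping) child and no node referenced as
-- a child twice, the closed-form condition under which A's dfs loop terminates (on a reachable cycle A loops
-- forever).  On excluded inputs whose sharing or wrapping still happens to terminate, A returns and B returns the
-- very same value (see the cites in the claim); they are excluded only because termination of A's loop is not a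
-- closed-form shape there.
def Pre_solution (k : Int) (nums : List Int) (lnks : List (Int × Int)) : Prop :=
  0 < nums.length ∧ nums.length ≤ lnks.length ∧
  (∀ p ∈ lnks.take nums.length,
      (p.1 = -1 ∨ (-(nums.length : Int) ≤ p.1 ∧ p.1 < (nums.length : Int))) ∧
      (p.2 = -1 ∨ (-(nums.length : Int) ≤ p.2 ∧ p.2 < (nums.length : Int)))) ∧
  (∃ i ∈ List.range nums.length,
      ((i : Int) ∉ (((lnks.take nums.length).flatMap (fun p => [p.1, p.2])).filter (· ≠ -1)
          |>.map (fun c => if c < 0 then c + (nums.length : Int) else c)))) ∧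
  ((PySem.List.max? nums (fun x => x)).getD 0 > nums.sum ∨
   ((∀ p ∈ lnks.take nums.length, (p.1 = -1 ∨ 0 ≤ p.1) ∧ (p.2 = -1 ∨ 0 ≤ p.2)) ∧
    (((lnks.take nums.length).flatMap (fun p => [p.1, p.2])).filter (· ≠ -1)).Nodup))

instance (k : Int) (nums : List Int) (lnks : List (Int × Int)) : Decidable (Pre_solution k nums lnks) := by
  unfold Pre_solution; infer_instance

def pvWitness_solution : Int × List Int × (List (Int × Int)) :=
  (2, [1, 2, 1], [(1, 2), (-1, -1), (-1, -1)])

def Spec_solution (k : Int) (nums : List Int) (lnks : List (Int × Int)) (out : Int) : Prop := out = solution_alt k nums lnks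
instance (k : Int) (nums : List Int) (lnks : List (Int × Int)) (out : Int) : Decidable (Spec_solution k nums lnks out) := by unfold Spec_solution; infer_instance

-- ===== CLAIM (what is proved, stated in full; the proofs are below) =====
def Claim_equal_solution : Prop := ∀ (k : Int) (nums : List Int) (lnks : List (Int × Int)), Dom_solution k nums lnks → Pre_solution k nums lnks → Spec_solution k nums lnks (solution k nums lnks)

-- ===== LEMMAS AND PROOFS =====

-- B-side helpers coincide definitionally with A-side ones (used to line the two ports up)
theorem kidsB_pyLnk (lnks : List (Int × Int)) (i : Int) : kidsB lnks i = pyLnk lnks i := rfl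

theorem valB_pyNum (nums : List Int) (i : Int) : valB nums i = pyNum nums i := rfl

-- proof-side recursive DICT-carrying DFS: the intermediate form between A's stack machine and B's
-- pure recursion (same fuel threading as goPure; carries A's sums dict and count accumulator)
def goDfs (nums : List Int) (lnks : List (Int × Int)) (m : Int) :
    Nat → Int → PySem.Dict Int Int → Int → Nat × PySem.Dict Int Int × Int × Bool
  | 0, _, sums, cnt => (0, sums, cnt, false)
  | f + 1, node, sums, cnt =>
    if node = -1 then (f, sums, cnt, true)
    else
      let t1 := goDfs nums lnks m f (pyLnk lnks node).2 sums cnt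
      if t1.2.2.2 then
        let t2 := goDfs nums lnks m (min t1.1 f) (pyLnk lnks node).1 t1.2.1 t1.2.2.1
        if t2.2.2.2 then
          match t2.1 with
          | 0 => (0, t2.2.1, t2.2.2.1, false)
          | g + 1 =>
            let lft := t2.2.1.getD (pyLnk lnks node).1 0
            let rgt := t2.2.1.getD (pyLnk lnks node).2 0
            let cur := pyNum nums node
            if cur + lft + rgt ≤ m then (g, t2.2.1.insert node (cur + lft + rgt), t2.2.2.1, true)
            else if cur + min lft rgt ≤ m then
              (g, t2.2.1.insert node (cur + min lft rgt), t2.2.2.1 + 1, true)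
            else (g, t2.2.1.insert node cur, t2.2.2.1 + 2, true)
        else (0, t2.2.1, t2.2.2.1, false)
      else (0, t1.2.1, t1.2.2.1, false)

-- the leftover fuel goDfs returns never exceeds the fuel it was given
theorem goDfs_fuel_le (nums : List Int) (lnks : List (Int × Int)) (m : Int) :
    ∀ (f : Nat) (v : Int) (s : PySem.Dict Int Int) (c : Int),
      (goDfs nums lnks m f v s c).1 ≤ f := by
  intro f
  induction f using Nat.strong_induction_on with
  | _ f ih =>
    intro v s c
    match f with
    | 0 => simp [goDfs]
    | f + 1 =>
      rw [goDfs]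
      by_cases hv : v = -1
      · simp [hv]
      · simp only [if_neg hv]
        rcases ht1 : goDfs nums lnks m f (pyLnk lnks v).2 s c with ⟨f1, s1, c1, ok1⟩
        cases ok1
        · simp
        ·
          rcases ht2 : goDfs nums lnks m (min f1 f) (pyLnk lnks v).1 s1 c1 with ⟨f2, s2, c2, ok2⟩
          cases ok2
          · simp
          · have h2 : f2 ≤ min f1 f := by
              have := ih (min f1 f) (by omega) (pyLnk lnks v).1 s1 c1
              rw [ht2] at this; exact this
            match f2, h2 with
            | 0, _ => simp
            | g + 1, h2 =>
              dsimp only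
              simp only [apply_ite (Prod.fst)]
              simp
              omega

-- simulation: one (v,0) frame on A's stack behaves exactly like one recursive call of the dict DFS
theorem run_goDfs (nums : List Int) (lnks : List (Int × Int)) (m : Int) :
    ∀ (f : Nat) (v : Int) (s : PySem.Dict Int Int) (c : Int) (rest : List (Int × Int)),
      runA nums lnks m f ((v, 0) :: rest) s c =
        (let t := goDfs nums lnks m f v s c
         if t.2.2.2 then runA nums lnks m t.1 rest t.2.1 t.2.2.1 else (t.2.1, t.2.2.1)) := by
  intro f
  induction f using Nat.strong_induction_on with
  | _ f ih =>
    intro v s c rest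
    match f with
    | 0 => simp [runA, goDfs]
    | f + 1 =>
      by_cases hv : v = -1
      · subst hv; rw [runA, goDfs]; simp
      · rw [runA, goDfs]
        simp only [if_neg hv]
        norm_num
        rw [ih f (by omega)]
        rcases ht1 : goDfs nums lnks m f (pyLnk lnks v).2 s c with ⟨f1, s1, c1, ok1⟩
        have hf1 : f1 ≤ f := by
          have := goDfs_fuel_le nums lnks m f (pyLnk lnks v).2 s c
          rw [ht1] at this; exact this
        cases ok1
        · simp
        · dsimp only
          rw [min_eq_left hf1]
          rw [ih f1 (by omega)]
          rcases ht2 : goDfs nums lnks m f1 (pyLnk lnks v).1 s1 c1 with ⟨f2, s2, c2, ok2⟩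
          cases ok2
          · simp
          · cases f2 with
            | zero => simp [runA]
            | succ g =>
              dsimp only
              rw [runA]
              simp only [if_neg hv]
              norm_num
              split
              · rfl
              · split <;> rfl

-- leftover fuel of the pure recursion never exceeds the fuel given
theorem goPure_fuel_le (nums : List Int) (lnks : List (Int × Int)) (m : Int) :
    ∀ (f : Nat) (v : Int), (goPure nums lnks m f v).1 ≤ f := by
  intro f
  induction f using Nat.strong_induction_on with
  | _ f ih =>
    intro v
    match f with
    | 0 => simp [goPure]
    | f + 1 =>
      rw [goPure]
      by_cases hv : v = -1
      · simp [hv]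
      · simp only [if_neg hv]
        rcases ht1 : goPure nums lnks m f (kidsB lnks v).2 with ⟨f1, x1, c1, ok1⟩
        cases ok1
        · simp
        · rcases ht2 : goPure nums lnks m (min f1 f) (kidsB lnks v).1 with ⟨f2, x2, c2, ok2⟩
          cases ok2
          · simp
          · have h2 : f2 ≤ min f1 f := by
              have := ih (min f1 f) (by omega) (kidsB lnks v).1
              rw [ht2] at this; exact this
            match f2, h2 with
            | 0, _ => simp
            | g + 1, h2 =>
              dsimp only
              simp only [apply_ite (Prod.fst)]
              simp
              omega

-- giving the pure recursion more fuel does not change a successful result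
-- (sum and count are unchanged, the extra fuel is simply left over)
theorem goPure_mono (nums : List Int) (lnks : List (Int × Int)) (m : Int) :
    ∀ (f f' : Nat) (v : Int), f ≤ f' → (goPure nums lnks m f v).2.2.2 = true →
      (goPure nums lnks m f' v).2.1 = (goPure nums lnks m f v).2.1 ∧
      (goPure nums lnks m f' v).2.2.1 = (goPure nums lnks m f v).2.2.1 ∧
      (goPure nums lnks m f' v).2.2.2 = true ∧
      (goPure nums lnks m f' v).1 = (goPure nums lnks m f v).1 + (f' - f) := by
  intro f
  induction f using Nat.strong_induction_on with
  | _ f ih =>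
    intro f' v hle hok
    match f, f' with
    | 0, _ => rw [goPure] at hok; simp at hok
    | f + 1, 0 => omega
    | f + 1, fb + 1 =>
      have hfb : f ≤ fb := by omega
      by_cases hv : v = -1
      · subst hv; rw [goPure] at hok ⊢; rw [goPure]; simp; omega
      · rw [goPure] at hok ⊢
        rw [goPure]
        simp only [if_neg hv] at hok ⊢
        rcases ht1 : goPure nums lnks m f (kidsB lnks v).2 with ⟨f1, x1, c1, ok1⟩
        rw [ht1] at hok
        cases ok1
        · simp at hok
        · have h1 := ih f (by omega) fb (kidsB lnks v).2 hfb (by rw [ht1])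
          rw [ht1] at h1
          rcases ht1' : goPure nums lnks m fb (kidsB lnks v).2 with ⟨f1', x1', c1', ok1'⟩
          rw [ht1'] at h1
          obtain ⟨hx1, hc1, hok1', hf1'⟩ := h1
          dsimp only at hx1 hc1 hok1' hf1' ⊢
          subst hx1; subst hc1; subst hok1'
          have hf1f : f1 ≤ f := by
            have := goPure_fuel_le nums lnks m f (kidsB lnks v).2
            rw [ht1] at this; exact this
          rw [min_eq_left hf1f] at hok ⊢
          have hmin' : min f1' fb = f1 + (fb - f) := by omega
          rw [hmin']
          dsimp only at hok
          rcases ht2 : goPure nums lnks m f1 (kidsB lnks v).1 with ⟨f2, x2, c2, ok2⟩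
          rw [ht2] at hok
          cases ok2
          · simp at hok
          · have h2 := ih f1 (by omega) (f1 + (fb - f)) (kidsB lnks v).1 (by omega) (by rw [ht2])
            rw [ht2] at h2
            rcases ht2' : goPure nums lnks m (f1 + (fb - f)) (kidsB lnks v).1 with ⟨f2', x2', c2', ok2'⟩
            rw [ht2'] at h2
            obtain ⟨hx2, hc2, hok2', hf2'⟩ := h2
            dsimp only at hx2 hc2 hok2' hf2' ⊢
            subst hx2; subst hc2; subst hok2'
            match f2, hok, hf2' with
            | 0, hok, _ => simp at hok
            | g + 1, hok, hf2' =>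
              have : f2' = (g + (fb - f)) + 1 := by omega
              rw [this]
              dsimp only
              split_ifs <;> simp_all

-- a successful pure result is fuel-independent
theorem goPure_uniq (nums : List Int) (lnks : List (Int × Int)) (m : Int)
    (g g' : Nat) (v : Int) (h : (goPure nums lnks m g v).2.2.2 = true)
    (h' : (goPure nums lnks m g' v).2.2.2 = true) :
    (goPure nums lnks m g v).2.1 = (goPure nums lnks m g' v).2.1 := by
  rcases le_total g g' with hle | hle
  · exact ((goPure_mono nums lnks m g g' v hle h).1).symm
  · exact (goPure_mono nums lnks m g' g v hle h').1

-- dict invariant: every entry of A's sums dict is the pure subtree sum of its key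
def GoodS (nums : List Int) (lnks : List (Int × Int)) (m : Int) (s : PySem.Dict Int Int) : Prop :=
  ∀ u : Int, s.get? u ≠ none →
    u ≠ -1 ∧ ∃ g : Nat, (goPure nums lnks m g u).2.2.2 = true ∧
      s.getD u 0 = (goPure nums lnks m g u).2.1

theorem GoodS_empty (nums : List Int) (lnks : List (Int × Int)) (m : Int) :
    GoodS nums lnks m PySem.Dict.empty := by
  intro u hu
  simp [PySem.Dict.get?_empty] at hu

-- the bridge: the dict DFS and Source B's pure recursion move in lockstep
theorem goDfs_goPure (nums : List Int) (lnks : List (Int × Int)) (m : Int) :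
    ∀ (f : Nat) (v : Int) (s : PySem.Dict Int Int) (c : Int), GoodS nums lnks m s →
      (goDfs nums lnks m f v s c).1 = (goPure nums lnks m f v).1 ∧
      (goDfs nums lnks m f v s c).2.2.1 = c + (goPure nums lnks m f v).2.2.1 ∧
      (goDfs nums lnks m f v s c).2.2.2 = (goPure nums lnks m f v).2.2.2 ∧
      GoodS nums lnks m (goDfs nums lnks m f v s c).2.1 ∧
      ((goPure nums lnks m f v).2.2.2 = true →
        (goDfs nums lnks m f v s c).2.1.getD v 0 = (goPure nums lnks m f v).2.1) ∧
      (∀ u : Int, s.get? u ≠ none → (goDfs nums lnks m f v s c).2.1.get? u ≠ none) ∧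
      ((goPure nums lnks m f v).2.2.2 = true → v ≠ -1 →
        (goDfs nums lnks m f v s c).2.1.get? v ≠ none) := by
  intro f
  induction f using Nat.strong_induction_on with
  | _ f ih =>
    intro v s c hs
    match f with
    | 0 =>
      simp only [goDfs, goPure]
      exact ⟨trivial, by simp, trivial, hs, by simp, fun u hu => hu, by simp⟩
    | f + 1 =>
      by_cases hv : v = -1
      · subst hv
        simp only [goDfs, goPure, if_pos]
        refine ⟨trivial, by simp, trivial, hs, ?_, fun u hu => hu, ?_⟩
        · intro _
          by_cases hmem : s.get? (-1 : Int) = none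
          · rw [PySem.Dict.getD_eq_get?_getD, hmem]; rfl
          · exact absurd rfl (hs (-1) hmem).1
        · intro _ hne; exact absurd rfl hne
      · have H1 := ih f (by omega) (pyLnk lnks v).2 s c hs
        rcases hd1 : goDfs nums lnks m f (pyLnk lnks v).2 s c with ⟨e1, s1, d1, okd1⟩
        rcases hp1 : goPure nums lnks m f (pyLnk lnks v).2 with ⟨f1, x1, c1, ok1⟩
        rw [hd1, hp1] at H1
        obtain ⟨hE1, hD1, hOk1, hG1, hGet1, hMem1, hMemv1⟩ := H1
        dsimp only at hE1 hD1 hOk1 hGet1 hMem1 hMemv1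
        subst hE1 hD1 hOk1
        simp only [goDfs, goPure, if_neg hv, kidsB_pyLnk, valB_pyNum, hd1, hp1]
        dsimp only at hG1
        cases okd1 with
        | false =>
          simp only [Bool.false_eq_true, if_false]
          exact ⟨by simp, by simp, by simp, hG1, by simp, fun u hu => hMem1 u hu, by simp⟩
        | true =>
          simp only [if_true]
          have H2 := ih (min e1 f) (by omega) (pyLnk lnks v).1 s1 (c + c1) hG1
          rcases hd2 : goDfs nums lnks m (min e1 f) (pyLnk lnks v).1 s1 (c + c1) with ⟨e2, s2, d2, okd2⟩
          rcases hp2 : goPure nums lnks m (min e1 f) (pyLnk lnks v).1 with ⟨f2, x2, c2, ok2⟩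
          rw [hd2, hp2] at H2
          obtain ⟨hE2, hD2, hOk2, hG2, hGet2, hMem2, hMemv2⟩ := H2
          dsimp only at hE2 hD2 hOk2 hGet2 hMem2 hMemv2 hG2
          subst hE2 hD2 hOk2
          cases okd2 with
          | false =>
            simp only [Bool.false_eq_true, if_false]
            refine ⟨by simp, by omega, by simp, hG2, by simp, fun u hu => hMem2 u (hMem1 u hu), by simp⟩
          | true =>
            simp only [if_true]
            cases e2 with
            | zero =>
              dsimp only
              refine ⟨by simp, by omega, by simp, hG2, by simp, fun u hu => hMem2 u (hMem1 u hu), by simp⟩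
            | succ g =>
              dsimp only
              have hGet1' : s1.getD (pyLnk lnks v).2 0 = x1 := hGet1 rfl
              have hlft : s2.getD (pyLnk lnks v).1 0 = x2 := hGet2 rfl
              have hrgt : s2.getD (pyLnk lnks v).2 0 = x1 := by
                by_cases h2 : (pyLnk lnks v).2 = -1
                · match f, hp1 with
                  | 0, hp1 =>
                    rw [goPure] at hp1
                    simp at hp1
                  | f' + 1, hp1 =>
                    rw [goPure, if_pos h2] at hp1
                    have hx1 : x1 = 0 := by
                      have := congrArg (fun t => t.2.1) hp1; simpa using this.symm
                    by_cases hmem : s2.get? (-1 : Int) = none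
                    · rw [h2, PySem.Dict.getD_eq_get?_getD, hmem, hx1]; rfl
                    · exact absurd rfl (hG2 (-1) hmem).1
                · have hm1 : s1.get? (pyLnk lnks v).2 ≠ none := hMemv1 rfl h2
                  have hm2 : s2.get? (pyLnk lnks v).2 ≠ none := hMem2 _ hm1
                  obtain ⟨-, g0, hok0, hval0⟩ := hG2 _ hm2
                  rw [hval0]
                  rw [goPure_uniq nums lnks m g0 f (pyLnk lnks v).2 hok0 (by rw [hp1]), hp1]
              rw [hlft, hrgt]
              have hptop0 : goPure nums lnks m (f + 1) v =
                  (if pyNum nums v + x2 + x1 ≤ m then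
                    (g, pyNum nums v + x2 + x1, c1 + c2, true)
                  else if pyNum nums v + min x2 x1 ≤ m then
                    (g, pyNum nums v + min x2 x1, c1 + c2 + 1, true)
                  else (g, pyNum nums v, c1 + c2 + 2, true)) := by
                rw [goPure]
                simp only [if_neg hv, kidsB_pyLnk, valB_pyNum, hp1, hp2]
                rfl
              split_ifs with hc1 hc2
              · have hptop : goPure nums lnks m (f + 1) v =
                    (g, pyNum nums v + x2 + x1, c1 + c2, true) := by
                  rw [hptop0, if_pos hc1]
                refine ⟨by simp, by show c + c1 + c2 = c + (c1 + c2); omega, by simp, ?_, ?_, ?_, ?_⟩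
                · intro u hu
                  rw [PySem.Dict.get?_insert] at hu
                  by_cases huv : u = v
                  · subst huv
                    refine ⟨hv, f + 1, by rw [hptop], ?_⟩
                    rw [hptop]
                    simp
                  · rw [if_neg huv] at hu
                    obtain ⟨hne, g0, hok, hval⟩ := hG2 u hu
                    exact ⟨hne, g0, hok, by rw [PySem.Dict.getD_insert, if_neg huv]; exact hval⟩
                · intro _
                  simp
                · intro u hu
                  rw [PySem.Dict.get?_insert]
                  split_ifs with h
                  · simp
                  · exact hMem2 u (hMem1 u hu)
                · intro _ _
                  simp
              · have hptop : goPure nums lnks m (f + 1) v =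
                    (g, pyNum nums v + min x2 x1, c1 + c2 + 1, true) := by
                  rw [hptop0, if_neg hc1, if_pos hc2]
                refine ⟨by simp, by show c + c1 + c2 + 1 = c + (c1 + c2 + 1); omega, by simp, ?_, ?_, ?_, ?_⟩
                · intro u hu
                  rw [PySem.Dict.get?_insert] at hu
                  by_cases huv : u = v
                  · subst huv
                    refine ⟨hv, f + 1, by rw [hptop], ?_⟩
                    rw [hptop]
                    simp
                  · rw [if_neg huv] at hu
                    obtain ⟨hne, g0, hok, hval⟩ := hG2 u hu
                    exact ⟨hne, g0, hok, by rw [PySem.Dict.getD_insert, if_neg huv]; exact hval⟩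
                · intro _
                  simp
                · intro u hu
                  rw [PySem.Dict.get?_insert]
                  split_ifs with h
                  · simp
                  · exact hMem2 u (hMem1 u hu)
                · intro _ _
                  simp
              · have hptop : goPure nums lnks m (f + 1) v =
                    (g, pyNum nums v, c1 + c2 + 2, true) := by
                  rw [hptop0, if_neg hc1, if_neg hc2]
                refine ⟨by simp, by show c + c1 + c2 + 2 = c + (c1 + c2 + 2); omega, by simp, ?_, ?_, ?_, ?_⟩
                · intro u hu
                  rw [PySem.Dict.get?_insert] at hu
                  by_cases huv : u = v
                  · subst huv
                    refine ⟨hv, f + 1, by rw [hptop], ?_⟩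
                    rw [hptop]
                    simp
                  · rw [if_neg huv] at hu
                    obtain ⟨hne, g0, hok, hval⟩ := hG2 u hu
                    exact ⟨hne, g0, hok, by rw [PySem.Dict.getD_insert, if_neg huv]; exact hval⟩
                · intro _
                  simp
                · intro u hu
                  rw [PySem.Dict.get?_insert]
                  split_ifs with h
                  · simp
                  · exact hMem2 u (hMem1 u hu)
                · intro _ _
                  simp



-- A's group count equals Source B's: the stack machine, the dict DFS and the pure recursion agree
theorem cnt_eq (nums : List Int) (lnks : List (Int × Int)) (m root : Int) :
    (dfsA nums lnks m root).2 = (goPure nums lnks m (4 * nums.length + 4) root).2.2.1 + 1 := by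
  unfold dfsA
  rw [run_goDfs]
  have h := goDfs_goPure nums lnks m (4 * nums.length + 4) root PySem.Dict.empty 0
    (GoodS_empty nums lnks m)
  dsimp only
  split
  · simp [runA, h.2.1]
  · simp [h.2.1]

theorem part_iff (nums : List Int) (lnks : List (Int × Int)) (m root k : Int) :
    partA nums lnks m root k = true ↔
      (goPure nums lnks m (4 * nums.length + 4) root).2.2.1 + 1 ≤ k := by
  unfold partA
  rw [cnt_eq]
  simp

theorem bs_eq (nums : List Int) (lnks : List (Int × Int)) (root k : Int) :
    ∀ (l r ans : Int), bsA nums lnks root k l r ans = loopB nums lnks root k l r ans := by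
  intro l r ans
  fun_induction bsA nums lnks root k l r ans with
  | case1 l r ans h mid hp ih =>
    conv_rhs => rw [loopB]
    rw [dif_pos h, if_pos ((part_iff nums lnks mid root k).mp hp)]
    exact ih
  | case2 l r ans h mid hp ih =>
    conv_rhs => rw [loopB]
    rw [dif_pos h, if_neg (fun hc => hp ((part_iff nums lnks mid root k).mpr hc))]
    exact ih
  | case3 l r ans h =>
    conv_rhs => rw [loopB]
    rw [dif_neg h]

-- the two root computations: parent[j] ≠ -1 exactly when has_parent[j] is true
def RelPH (par : List Int) (hp : List Bool) : Prop :=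
  par.length = hp.length ∧ ∀ j : Nat, (par[j]? = some (-1) ↔ hp[j]? = some false)

theorem rel_write (par : List Int) (hp : List Bool) (c v : Int) (hv : v ≠ -1)
    (h : RelPH par hp) : RelPH (PySem.List.pySetD par c v) (PySem.List.pySetD hp c true) := by
  obtain ⟨hlen, hiff⟩ := h
  unfold PySem.List.pySetD PySem.List.pySet?
  rw [hlen]
  cases hk : PySem.List.pyIdx? hp.length c with
  | none => exact ⟨hlen, hiff⟩
  | some kk =>
    dsimp only [Option.map_some, Option.getD_some]
    refine ⟨by simp [hlen], fun j => ?_⟩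
    rw [List.getElem?_set, List.getElem?_set]
    by_cases hj : kk = j
    · subst hj
      rw [if_pos rfl, if_pos rfl, hlen]
      split_ifs <;> simp [hv]
    · rw [if_neg hj, if_neg hj]
      exact hiff j

theorem rel_fold (ps : List (Int × Int)) :
    ∀ (i0 : Nat) (par : List Int) (hp : List Bool), RelPH par hp →
      RelPH
        ((ps.zipIdx i0).foldl (fun par q =>
          let par := if q.1.1 ≠ -1 then PySem.List.pySetD par q.1.1 (q.2 : Int) else par
          if q.1.2 ≠ -1 then PySem.List.pySetD par q.1.2 (q.2 : Int) else par) par)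
        (ps.foldl (fun hp p =>
          let hp := if p.1 ≠ -1 then PySem.List.pySetD hp p.1 true else hp
          if p.2 ≠ -1 then PySem.List.pySetD hp p.2 true else hp) hp) := by
  induction ps with
  | nil => intro i0 par hp h; simpa using h
  | cons p ps ih =>
    intro i0 par hp h
    rw [List.zipIdx_cons, List.foldl_cons, List.foldl_cons]
    apply ih
    dsimp only
    split_ifs
    all_goals first
      | exact rel_write _ _ p.2 (i0 : Int) (by omega) (rel_write _ _ p.1 (i0 : Int) (by omega) h)
      | exact rel_write _ _ p.1 (i0 : Int) (by omega) h
      | exact rel_write _ _ p.2 (i0 : Int) (by omega) h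
      | exact h

theorem rel_findIdx (par : List Int) :
    ∀ (hp : List Bool), RelPH par hp →
      par.findIdx? (· == (-1 : Int)) = hp.findIdx? (· == false) := by
  induction par with
  | nil =>
    intro hp h
    have : hp = [] := List.eq_nil_of_length_eq_zero h.1.symm
    subst this; rfl
  | cons a par ih =>
    intro hp h
    match hp, h with
    | b :: hp, h =>
      have hhead : a = -1 ↔ b = false := by
        have := h.2 0
        simpa using this
      have htail : RelPH par hp := by
        refine ⟨by have := h.1; simpa using this, fun j => ?_⟩
        have := h.2 (j + 1)
        simpa using this
      rw [List.findIdx?_cons, List.findIdx?_cons]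
      by_cases ha : a = -1
      · have hb : b = false := hhead.mp ha
        simp [ha, hb]
      · have hb : b = true := by
          cases b
          · exact absurd (hhead.mpr rfl) ha
          · rfl
        simp only [hb]
        simp [ih hp htail, ha]

-- re-index A's fold over range(n) as a fold over the indexed first n links
theorem rangeA_zip (lnks : List (Int × Int)) (body : List Int → (Int × Int) → Nat → List Int) :
    ∀ (n : Nat), n ≤ lnks.length → ∀ (init : List Int),
      (List.range n).foldl (fun par (i : Nat) => body par (pyLnk lnks (i : Int)) i) init =
        ((lnks.take n).zipIdx 0).foldl (fun par q => body par q.1 q.2) init := by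
  intro n
  induction n with
  | zero => intro _ init; rfl
  | succ n ih =>
    intro hn init
    have hn' : n ≤ lnks.length := by omega
    have hlt : n < lnks.length := by omega
    rw [List.range_succ, List.foldl_append, ih hn']
    rw [List.take_add_one, List.getElem?_eq_getElem hlt]
    rw [List.zipIdx_append, List.foldl_append]
    simp only [List.length_take, Option.toList_some, List.zipIdx_cons, List.zipIdx_nil,
      List.foldl_cons, List.foldl_nil]
    have hmin : min n lnks.length = n := by omega
    rw [hmin]
    have hget : pyLnk lnks (n : Int) = lnks[n] := by
      unfold pyLnk
      rw [PySem.List.pyGet?_natCast, List.getElem?_eq_getElem hlt]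
      rfl
    simp [hget]

theorem root_eq (lnks : List (Int × Int)) (n : Nat) (hn : n ≤ lnks.length) :
    findRoot lnks n = findRootB lnks n := by
  unfold findRoot findRootB
  rw [PySem.List.slice_to_natCast]
  show (match
      (((List.range n).foldl
        (fun par (i : Nat) =>
          let pr := pyLnk lnks (i : Int)
          let par := if pr.1 ≠ -1 then PySem.List.pySetD par pr.1 (i : Int) else par
          if pr.2 ≠ -1 then PySem.List.pySetD par pr.2 (i : Int) else par)
        (List.replicate n (-1 : Int))).findIdx? (· == (-1 : Int))) with
    | some i => (i : Int)
    | none => 0) =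
    (match
      (PySem.List.index?
        ((lnks.take n).foldl
          (fun hp p =>
            let hp := if p.1 ≠ -1 then PySem.List.pySetD hp p.1 true else hp
            if p.2 ≠ -1 then PySem.List.pySetD hp p.2 true else hp)
          (List.replicate n false)) false) with
    | some i => (i : Int)
    | none => 0)
  have hfold :
      (List.range n).foldl
        (fun par (i : Nat) =>
          let pr := pyLnk lnks (i : Int)
          let par := if pr.1 ≠ -1 then PySem.List.pySetD par pr.1 (i : Int) else par
          if pr.2 ≠ -1 then PySem.List.pySetD par pr.2 (i : Int) else par)
        (List.replicate n (-1 : Int)) =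
      ((lnks.take n).zipIdx 0).foldl
        (fun par q =>
          let par := if q.1.1 ≠ -1 then PySem.List.pySetD par q.1.1 (q.2 : Int) else par
          if q.1.2 ≠ -1 then PySem.List.pySetD par q.1.2 (q.2 : Int) else par)
        (List.replicate n (-1 : Int)) :=
    rangeA_zip lnks
      (fun par pr i =>
        let par := if pr.1 ≠ -1 then PySem.List.pySetD par pr.1 (i : Int) else par
        if pr.2 ≠ -1 then PySem.List.pySetD par pr.2 (i : Int) else par) n hn _
  have hinit : RelPH (List.replicate n (-1 : Int)) (List.replicate n false) := by
    refine ⟨by simp, fun j => ?_⟩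
    rw [List.getElem?_replicate, List.getElem?_replicate]
    split_ifs <;> simp
  have hrel := rel_fold (lnks.take n) 0 (List.replicate n (-1 : Int)) (List.replicate n false) hinit
  rw [hfold, rel_findIdx _ _ hrel, PySem.List.index?_eq_idxOf?]
  rfl

-- ===== VERDICT (by name: the statement is the Claim_ definition above) =====
theorem solution_spec : Claim_equal_solution := by
  intro k nums lnks _ hpre
  unfold Spec_solution
  simp only [solution, solution_alt]
  rw [root_eq lnks nums.length hpre.2.1]
  rw [show nums.foldl (· + ·) 0 = nums.sum from (List.sum_eq_foldl).symm]
  exact bs_eq nums lnks (findRootB lnks nums.length) k _ _ _
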